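-- pv_equiv track=rewrite | github.com/pypi-data/pypi-mirror-399 | packages/pyrolysate/pyrolysate-1.0.0.tar.gz/pyrolysate-1.0.0/pyrolysate/email_parser.py | get_comments_check_dots
-- ===== SOURCE A (Python) =====
-- def get_comments_check_dots(text: str) -> list[str] | None:
--     results = []
--     stack = 0
--     start_index = None
--     prev_dot = False
--
--     for i, char in enumerate(text):
--         if char == ".":
--             if prev_dot is True:
--                 return None
--             prev_dot = True
--         else:
--             prev_dot = False
--
--         if char == "(":
--             if stack == 0:
--                 start_index = i
--             stack += 1
--         elif char == ")":
--             stack -= 1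
--             if stack == 0:
--                 content = text[start_index : i + 1]
--                 results.append(content)
--         # Return None if seen '(' != ')' ie. a string like ))()
--         if stack < 0:
--             return None
--     # Return None if there are unclosed parentheses
--     if stack != 0:
--         return None
--
--     return results
-- ===== SOURCE B (Python) =====
-- def get_comments_check_dots(text: str) -> list[str] | None:
--     # Reject any doubled dot with one substring test.
--     if ".." in text:
--         return None
--     # Jump between groups with str.find instead of scanning every character:
--     # locate the next '(' (a stray ')' before it means unbalance), delegate to a
--     # dedicated matching-paren scan, slice the group, resume after it.
--     results = []
--     pos = 0
--     while True:
--         i = text.find("(", pos)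
--         j = text.find(")", pos)
--         if j != -1 and (i == -1 or j < i):
--             return None  # stray close paren with no open group before the next open paren
--         if i == -1:
--             return results  # no parens left (and no stray ')')
--         k = _matching(text, i)
--         if k is None:
--             return None  # '(' never closed
--         results.append(text[i:k + 1])
--         pos = k + 1
--
--
-- def _matching(text, i):
--     """Index of the ')' matching the '(' at index i, or None."""
--     depth = 0
--     for j in range(i, len(text)):
--         if text[j] == "(":
--             depth += 1
--         elif text[j] == ")":
--             depth -= 1
--             if depth == 0:
--                 return j
--     return None
-- ===== Notes on version B (the rewrite author's own statement) =====
-- stated objective: alternative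
-- what changed: A's single character-by-character pass interleaving a previous-dot flag with a global depth counter is replaced by a doubled-dot substring test plus a find-driven outer loop that jumps from group to group (rejecting a stray close paren found before the next open paren) and delegates each group to a separate matching-paren scan.
import Mathlib
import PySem

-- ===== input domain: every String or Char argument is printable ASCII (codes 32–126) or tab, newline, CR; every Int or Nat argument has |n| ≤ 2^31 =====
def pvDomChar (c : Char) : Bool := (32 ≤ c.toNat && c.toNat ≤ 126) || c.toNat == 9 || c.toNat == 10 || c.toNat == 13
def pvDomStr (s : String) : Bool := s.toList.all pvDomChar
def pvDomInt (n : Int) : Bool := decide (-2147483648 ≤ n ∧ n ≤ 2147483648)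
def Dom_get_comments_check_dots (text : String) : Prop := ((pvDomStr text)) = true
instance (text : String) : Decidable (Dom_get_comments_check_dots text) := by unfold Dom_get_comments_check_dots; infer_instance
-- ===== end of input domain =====

-- B replaces A's single interleaved character pass by a '..' substring test plus a
-- find-driven outer loop that jumps from group to group, delegating each group to a
-- dedicated matching-paren scan (objective: alternative; same cost).

-- ===== PORT A =====
-- One pass that tracks a double-dot flag, a paren depth and the start of the current
-- top-level group, exactly as the Python loop does.
def pvLoopA (text : List Char) (cs : List Char) (i : Nat) (results : List String)
    (stack : Int) (start : Option Nat) (prevDot : Bool) : Option (List String) :=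
  match cs with
  | [] => if stack ≠ 0 then none else some results
  | c :: rest =>
    if prevDot ∧ c = '.' then none
    else
      let prevDot' := c = '.'
      if c = '(' then
        let start' := if stack = 0 then some i else start
        if stack + 1 < 0 then none
        else pvLoopA text rest (i+1) results (stack+1) start' prevDot'
      else if c = ')' then
        let stack' := stack - 1
        -- start.getD 0: start_index is always set when stack returns to 0 (stack was positive),
        -- so the default is never the value actually sliced with
        let results' := if stack' = 0 then
            results ++ [String.ofList (PySem.List.slice text (some ((start.getD 0 : Nat) : Int)) (some ((i : Int) + 1)))]
          else results
        if stack' < 0 then none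
        else pvLoopA text rest (i+1) results' stack' start prevDot'
      else
        if stack < 0 then none
        else pvLoopA text rest (i+1) results stack start prevDot'

def get_comments_check_dots (text : String) : Option (List String) :=
  pvLoopA text.toList text.toList 0 [] 0 none false

-- ===== PORT B =====
-- text.find(c, pos): first absolute index ≥ pos holding c (none = Python's -1).
-- Called with the suffix text.drop pos and absolute start index pos; exact since pos ≤ len(text).
def pvFindFrom (cs : List Char) (j : Nat) (c : Char) : Option Nat :=
  match cs with
  | [] => none
  | d :: rest => if d = c then some j else pvFindFrom rest (j+1) c

-- _matching's scan: `for j in range(i, len(text))` over the suffix, j the absolute index.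
def pvMatchGo (cs : List Char) (j : Nat) (depth : Int) : Option Nat :=
  match cs with
  | [] => none
  | c :: rest =>
    if c = '(' then pvMatchGo rest (j+1) (depth+1)
    else if c = ')' then
      if depth - 1 = 0 then some j else pvMatchGo rest (j+1) (depth - 1)
    else pvMatchGo rest (j+1) depth

-- Source B's while-loop; fuel (= len(text)+1) only makes the same computation total:
-- pos strictly increases each iteration, so the fuel is never exhausted.
def pvGroupsFuel (text : List Char) : Nat → Nat → List String → Option (List String)
  | 0, _, _ => none
  | fuel+1, pos, results =>
    match pvFindFrom (text.drop pos) pos '(' , pvFindFrom (text.drop pos) pos ')' with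
    | none, some _ => none          -- j != -1 and i == -1
    | none, none => some results    -- i == -1 (and no stray ')')
    | some i, j? =>
      if (match j? with | some j => decide (j < i) | none => false) then none   -- j != -1 and j < i
      else
        match pvMatchGo (text.drop i) i 0 with
        | none => none
        | some k =>
          pvGroupsFuel text fuel (k+1)
            (results ++ [String.ofList (PySem.List.slice text (some (i : Int)) (some ((k : Int) + 1)))])

def get_comments_check_dots_alt (text : String) : Option (List String) :=
  if PySem.Str.isIn ".." text then none
  else pvGroupsFuel text.toList (text.toList.length + 1) 0 []

-- ===== PRECONDITION & SPEC =====
def Spec_get_comments_check_dots (text : String) (out : Option (List String)) : Prop := out = get_comments_check_dots_alt text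
instance (text : String) (out : Option (List String)) : Decidable (Spec_get_comments_check_dots text out) := by unfold Spec_get_comments_check_dots; infer_instance

-- ===== CLAIM (what is proved, stated in full; the proofs are below) =====
def Claim_equal_get_comments_check_dots : Prop := ∀ (text : String), Dom_get_comments_check_dots text → Spec_get_comments_check_dots text (get_comments_check_dots text)

-- ===== LEMMAS AND PROOFS =====

-- A's double-dot state machine, isolated: does the flag ever fire on cs given the incoming flag?
def pvHasDD : Bool → List Char → Bool
  | _, [] => false
  | prev, c :: rest => (prev && decide (c = '.')) || pvHasDD (decide (c = '.')) rest

-- Bridge between the two ports: a paren-only single pass (no dot flag).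
def pvLoopB (text : List Char) (cs : List Char) (i : Nat) (results : List String)
    (depth : Int) (start : Nat) : Option (List String) :=
  match cs with
  | [] => if depth ≠ 0 then none else some results
  | c :: rest =>
    if c = '(' then
      pvLoopB text rest (i+1) results (depth+1) (if depth = 0 then i else start)
    else if c = ')' then
      if depth = 0 then none
      else
        let depth' := depth - 1
        pvLoopB text rest (i+1)
          (if depth' = 0 then
              results ++ [String.ofList (PySem.List.slice text (some (start : Int)) (some ((i : Int) + 1)))]
            else results)
          depth' start
    else pvLoopB text rest (i+1) results depth start

-- If the double-dot machine fires somewhere on the remaining input, A's loop returns none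
-- (either at the double dot or earlier at a negative stack).
theorem pvLoopA_none_of_dd (cs : List Char) : ∀ (text : List Char) (i : Nat)
    (rs : List String) (stack : Int) (start : Option Nat) (prev : Bool),
    pvHasDD prev cs = true → pvLoopA text cs i rs stack start prev = none := by
  induction cs with
  | nil => intro _ _ _ _ _ _ h; simp [pvHasDD] at h
  | cons c rest ih =>
    intro text i rs stack start prev h
    simp only [pvHasDD, Bool.or_eq_true, Bool.and_eq_true, decide_eq_true_eq] at h
    unfold pvLoopA
    by_cases hd : prev ∧ c = '.'
    · simp [hd]
    · have hdd : pvHasDD (decide (c = '.')) rest = true := by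
        rcases h with ⟨hp, hc⟩ | h
        · exact absurd ⟨by simp [hp], hc⟩ hd
        · exact h
      rw [if_neg hd]
      dsimp only
      split_ifs <;> first | rfl | exact ih _ _ _ _ _ _ hdd

-- If the double-dot machine never fires, A's loop coincides with the paren-only loop,
-- under the invariant 0 ≤ stack and: while inside a group, A's start index is set and equals B's.
theorem pvLoopA_eq_pvLoopB (cs : List Char) : ∀ (text : List Char) (i : Nat)
    (rs : List String) (stack : Int) (startA : Option Nat) (startB : Nat) (prev : Bool),
    pvHasDD prev cs = false → 0 ≤ stack → (0 < stack → startA = some startB) →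
    pvLoopA text cs i rs stack startA prev = pvLoopB text cs i rs stack startB := by
  induction cs with
  | nil => intro _ _ _ _ _ _ _ _ _ _; simp [pvLoopA, pvLoopB]
  | cons c rest ih =>
    intro text i rs stack startA startB prev h hs hst
    simp only [pvHasDD, Bool.or_eq_false_iff, Bool.and_eq_false_iff] at h
    obtain ⟨h1, h2⟩ := h
    have hd : ¬ (prev ∧ c = '.') := by
      rcases h1 with h1 | h1 <;> simp_all
    unfold pvLoopA pvLoopB
    simp only [if_neg hd]
    by_cases hc : c = '('
    · subst hc
      simp only [Char.reduceEq, reduceIte, decide_false] at h2 ⊢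
      rw [if_neg (by omega)]
      apply ih _ _ _ _ _ _ _ h2 (by omega)
      intro _
      by_cases h0 : stack = 0
      · simp [h0]
      · simp only [if_neg h0]; exact hst (by omega)
    · by_cases hc2 : c = ')'
      · subst hc2
        simp only [Char.reduceEq, reduceIte, decide_false] at h2 ⊢
        by_cases h0 : stack = 0
        · subst h0; norm_num
        · have hpos : 0 < stack := by omega
          rw [if_neg (by omega), if_neg h0]
          have hsa : startA = some startB := hst hpos
          subst hsa
          simp only [Option.getD_some]
          exact ih _ _ _ _ _ _ _ h2 (by omega) (fun _ => rfl)
      · have hcb : (c == '.') = (decide (c = '.')) := rfl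
        rw [if_neg hc, if_neg hc, if_neg hc2, if_neg hc2, if_neg (by omega : ¬ stack < 0)]
        exact ih _ _ _ _ _ _ _ h2 hs hst

-- The isolated machine started with a clear flag fires exactly on strings containing "..".
theorem pvHasDD_iff (cs : List Char) : ∀ (prev : Bool),
    pvHasDD prev cs = true ↔ (prev = true ∧ cs.head? = some '.') ∨ ['.', '.'] <:+: cs := by
  induction cs with
  | nil => intro prev; simp [pvHasDD]
  | cons c rest ih =>
    intro prev
    simp only [pvHasDD, Bool.or_eq_true, Bool.and_eq_true, decide_eq_true_eq, ih, List.head?_cons,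
      Option.some_inj, List.infix_cons_iff]
    constructor
    · rintro (⟨hp, hc⟩ | ⟨hc, hh⟩ | h)
      · exact Or.inl ⟨hp, hc⟩
      · refine Or.inr (Or.inl ?_)
        have hc' : c = '.' := by simpa using hc
        subst hc'
        cases rest with
        | nil => simp at hh
        | cons d t =>
          simp only [List.head?_cons, Option.some_inj] at hh
          subst hh
          exact ⟨t, rfl⟩
      · exact Or.inr (Or.inr h)
    · rintro (⟨hp, hc⟩ | hpre | h)
      · exact Or.inl ⟨hp, hc⟩
      · obtain ⟨t, ht⟩ := hpre
        cases rest with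
        | nil => simp at ht
        | cons d tl =>
          have : c = '.' ∧ d = '.' := by
            have := ht
            simp only [List.cons_append] at this
            injection this with e1 e2
            injection e2 with e3 _
            exact ⟨e1.symm, e3.symm⟩
          exact Or.inr (Or.inl ⟨by simp [this.1], by simp [this.2]⟩)
      · exact Or.inr (Or.inr h)

-- A find result is at least the start index.
theorem pvFindFrom_ge (cs : List Char) : ∀ (j k : Nat) (c : Char),
    pvFindFrom cs j c = some k → j ≤ k := by
  induction cs with
  | nil => intro j k c h; simp [pvFindFrom] at h
  | cons d rest ih =>
    intro j k c h
    unfold pvFindFrom at h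
    by_cases hd : d = c
    · simp [hd] at h; omega
    · rw [if_neg hd] at h; have := ih _ _ _ h; omega

-- A matching result is at least the start index.
theorem pvMatchGo_ge (cs : List Char) : ∀ (j k : Nat) (d : Int),
    pvMatchGo cs j d = some k → j ≤ k := by
  induction cs with
  | nil => intro j k d h; simp [pvMatchGo] at h
  | cons c rest ih =>
    intro j k d h
    unfold pvMatchGo at h
    split_ifs at h with h1 h2 h3
    · have := ih _ _ _ h; omega
    · simp at h; omega
    · have := ih _ _ _ h; omega
    · have := ih _ _ _ h; omega

-- drop one more
theorem pvDropSucc (text : List Char) (pos : Nat) (c : Char) (rest : List Char)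
    (h : text.drop pos = c :: rest) : text.drop (pos+1) = rest := by
  have : text.drop (pos+1) = (text.drop pos).drop 1 := by
    rw [List.drop_drop]
  rw [this, h]; rfl

theorem pvDropLt (text : List Char) (pos : Nat) (c : Char) (rest : List Char)
    (h : text.drop pos = c :: rest) : pos < text.length := by
  by_contra hn
  rw [List.drop_eq_nil_of_le (by omega)] at h
  simp at h

-- Inside a group (depth ≥ 1), the paren-only pass is: run the matching scan; on failure
-- none, on the matching index k append the slice and resume the pass at k+1.
theorem pvLoopB_match (cs : List Char) : ∀ (text : List Char) (j : Nat)
    (rs : List String) (start : Nat) (depth : Int), 1 ≤ depth → cs = text.drop j →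
    pvLoopB text cs j rs depth start =
      (match pvMatchGo cs j depth with
       | none => none
       | some k => pvLoopB text (text.drop (k+1)) (k+1)
           (rs ++ [String.ofList (PySem.List.slice text (some (start : Int)) (some ((k : Int) + 1)))])
           0 start) := by
  induction cs with
  | nil => intro text j rs start depth hd _; simp [pvLoopB, pvMatchGo]; omega
  | cons c rest ih =>
    intro text j rs start depth hd hcs
    have hrest : rest = text.drop (j+1) := (pvDropSucc text j c rest hcs.symm).symm
    by_cases hc : c = '('
    · conv_lhs => rw [pvLoopB]
      conv_rhs => rw [pvMatchGo]
      simp only [if_pos hc, if_neg (by omega : ¬ depth = 0)]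
      exact ih text (j+1) rs start (depth+1) (by omega) hrest
    · by_cases hc2 : c = ')'
      · conv_lhs => rw [pvLoopB]
        conv_rhs => rw [pvMatchGo]
        simp only [if_neg hc, if_pos hc2, if_neg (by omega : ¬ depth = 0)]
        by_cases h1 : depth - 1 = 0
        · simp only [h1, reduceIte, ← hrest]
        · simp only [if_neg h1]
          exact ih text (j+1) rs start (depth-1) (by omega) hrest
      · conv_lhs => rw [pvLoopB]
        conv_rhs => rw [pvMatchGo]
        simp only [if_neg hc, if_neg hc2]
        exact ih text (j+1) rs start depth hd hrest

-- At depth 0, the paren-only pass computes Source B's find-driven group loop.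
theorem pvLoopB_eq_groups : ∀ (n : Nat) (text : List Char) (pos : Nat)
    (rs : List String) (start : Nat) (fuel : Nat),
    text.length - pos ≤ n → text.length - pos < fuel →
    pvLoopB text (text.drop pos) pos rs 0 start = pvGroupsFuel text fuel pos rs := by
  intro n
  induction n with
  | zero =>
    intro text pos rs start fuel hn hf
    cases hdrop : text.drop pos with
    | cons c rest => have := pvDropLt text pos c rest hdrop; omega
    | nil =>
      obtain ⟨f, rfl⟩ : ∃ f, fuel = f + 1 := ⟨fuel - 1, by omega⟩
      simp [pvLoopB, pvGroupsFuel, hdrop, pvFindFrom]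
  | succ n ih =>
    intro text pos rs start fuel hn hf
    obtain ⟨f, rfl⟩ : ∃ f, fuel = f + 1 := ⟨fuel - 1, by omega⟩
    cases hdrop : text.drop pos with
    | nil => simp [pvLoopB, pvGroupsFuel, hdrop, pvFindFrom]
    | cons c rest =>
      have hrest : rest = text.drop (pos+1) := (pvDropSucc text pos c rest hdrop).symm
      have hlt : pos < text.length := pvDropLt text pos c rest hdrop
      by_cases hc : c = '('
      · -- next char opens a group: both sides run the matching scan from pos
        subst hc
        have hstep : pvLoopB text ('(' :: rest) pos rs 0 start
            = pvLoopB text rest (pos+1) rs 1 pos := by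
          simp [pvLoopB]
        rw [hstep, pvLoopB_match rest text (pos+1) rs pos 1 (by omega) hrest]
        have hmg : pvMatchGo (text.drop pos) pos 0 = pvMatchGo rest (pos+1) 1 := by
          rw [hdrop]; simp [pvMatchGo]
        have hguard : ∀ j?, pvFindFrom (text.drop pos) pos ')' = j? →
            (match j? with | some j => decide (j < pos) | none => false) = false := by
          intro j? hj
          cases j? with
          | none => rfl
          | some j =>
            rw [hdrop] at hj
            unfold pvFindFrom at hj
            rw [if_neg (by decide : ¬ '(' = ')')] at hj
            have := pvFindFrom_ge rest (pos+1) j ')' hj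
            simp; omega
        unfold pvGroupsFuel
        have hi : pvFindFrom (text.drop pos) pos '(' = some pos := by
          rw [hdrop]; simp [pvFindFrom]
        rw [hi]
        cases hj : pvFindFrom (text.drop pos) pos ')' with
        | none =>
          simp only []
          rw [hmg]
          cases hk : pvMatchGo rest (pos+1) 1 with
          | none => rfl
          | some k =>
            have hkge := pvMatchGo_ge rest (pos+1) k 1 hk
            exact ih text (k+1) _ pos (f) (by omega) (by omega)
        | some j =>
          have := hguard (some j) hj
          simp only [this]
          rw [hmg]
          cases hk : pvMatchGo rest (pos+1) 1 with
          | none => rfl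
          | some k =>
            have hkge := pvMatchGo_ge rest (pos+1) k 1 hk
            exact ih text (k+1) _ pos (f) (by omega) (by omega)
      · by_cases hc2 : c = ')'
        · -- stray close: both sides reject
          subst hc2
          have hstep : pvLoopB text (')' :: rest) pos rs 0 start = none := by
            simp [pvLoopB]
          rw [hstep]
          unfold pvGroupsFuel
          have hj : pvFindFrom (text.drop pos) pos ')' = some pos := by
            rw [hdrop]; simp [pvFindFrom]
          rw [hj]
          cases hi : pvFindFrom (text.drop pos) pos '(' with
          | none => rfl
          | some i =>
            have : pos + 1 ≤ i := by
              rw [hdrop] at hi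
              unfold pvFindFrom at hi
              rw [if_neg (by decide : ¬ ')' = '(')] at hi
              exact pvFindFrom_ge rest (pos+1) i '(' hi
            simp only []
            rw [if_pos (by simp; omega)]
        · -- ordinary character: both sides skip it
          have hstep : pvLoopB text (c :: rest) pos rs 0 start
              = pvLoopB text (text.drop (pos+1)) (pos+1) rs 0 start := by
            rw [← hrest]; simp [pvLoopB, hc, hc2]
          rw [hstep, ih text (pos+1) rs start (f+1) (by omega) (by omega)]
          -- pvGroupsFuel at pos and pos+1 see the same finds, hence the same body
          unfold pvGroupsFuel
          have hia : pvFindFrom (text.drop pos) pos '(' = pvFindFrom (text.drop (pos+1)) (pos+1) '(' := by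
            rw [hdrop, ← hrest]; simp [pvFindFrom, hc]
          have hja : pvFindFrom (text.drop pos) pos ')' = pvFindFrom (text.drop (pos+1)) (pos+1) ')' := by
            rw [hdrop, ← hrest]; simp [pvFindFrom, hc2]
          rw [hia, hja]

-- ===== VERDICT (by name: the statement is the Claim_ definition above) =====
theorem get_comments_check_dots_spec : Claim_equal_get_comments_check_dots := by
  intro text _
  unfold Spec_get_comments_check_dots get_comments_check_dots get_comments_check_dots_alt
  by_cases h : PySem.Str.isIn ".." text = true
  · rw [if_pos h]
    have hinf : ("..".toList) <:+: text.toList := (PySem.Str.isIn_iff_infix _ _).mp h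
    have hdd : pvHasDD false text.toList = true :=
      (pvHasDD_iff _ false).mpr (Or.inr (by simpa using hinf))
    exact pvLoopA_none_of_dd _ _ _ _ _ _ _ hdd
  · rw [if_neg h]
    have hdd : pvHasDD false text.toList = false := by
      by_cases h0 : pvHasDD false text.toList = true
      · exact absurd ((PySem.Str.isIn_iff_infix _ _).mpr
          (by rcases (pvHasDD_iff _ false).mp h0 with ⟨hf, _⟩ | hi
              · simp at hf
              · simpa using hi)) h
      · simpa using h0
    rw [pvLoopA_eq_pvLoopB _ _ _ _ _ _ _ _ hdd le_rfl (by omega)]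
    have := pvLoopB_eq_groups text.toList.length text.toList 0 [] 0 (text.toList.length + 1)
      (by omega) (by omega)
    simpa using this
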